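-- pv_equiv track=rewrite | github.com/yesjiyoung/OSS_NL2SQL_Shopping_Cart_Speaker | model/sql_translation/select.py | se_find_brand_value
-- ===== SOURCE A (Python) =====
-- def se_find_brand_value (any_list):
--     re = 'NAN'
--     brand = ['easy farm', 'olga', 'delmont', 'chiquita', 'dibella', 'pam cook', 'costco', 'glam cook', 'meat cut']
--     for i in range(0, len(any_list)):
--         for j in range(0, len(brand)):
--             if(any_list[i] == brand[j]):
--                 re = brand[j]
--                 break
--
--     return re
-- ===== SOURCE B (Python) =====
-- def se_find_brand_value(any_list):
--     brand = ['easy farm', 'olga', 'delmont', 'chiquita', 'dibella', 'pam cook', 'costco', 'glam cook', 'meat cut']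
--     for x in reversed(any_list):
--         if x in brand:
--             return x
--     return 'NAN'
-- ===== Notes on version B (the rewrite author's own statement) =====
-- stated objective: simpler
-- what changed: Replaces the forward double scan that keeps overwriting an accumulator with a single reverse scan that returns the first (i.e. last) matching element immediately.
import Mathlib
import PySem

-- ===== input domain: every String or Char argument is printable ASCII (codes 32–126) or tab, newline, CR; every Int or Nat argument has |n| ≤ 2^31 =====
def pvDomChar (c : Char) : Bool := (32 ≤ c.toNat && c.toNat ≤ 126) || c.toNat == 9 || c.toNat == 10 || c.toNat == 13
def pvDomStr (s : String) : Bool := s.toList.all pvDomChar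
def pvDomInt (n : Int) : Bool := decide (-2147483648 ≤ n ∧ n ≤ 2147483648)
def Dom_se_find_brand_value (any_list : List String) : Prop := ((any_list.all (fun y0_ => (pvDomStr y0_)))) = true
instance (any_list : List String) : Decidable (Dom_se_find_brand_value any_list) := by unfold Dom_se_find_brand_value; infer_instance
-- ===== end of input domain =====

-- B replaces A's forward double scan with overwritten accumulator by a reverse scan with early return; objective: simpler.

def pvBrands : List String :=
  ["easy farm", "olga", "delmont", "chiquita", "dibella", "pam cook", "costco", "glam cook", "meat cut"]

-- ===== PORT A =====
-- inner 'for j' loop with break: first brand equal to x replaces re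
def pvInnerA (re : String) (x : String) (bs : List String) : String :=
  match bs with
  | [] => re
  | b :: rest => if x = b then b else pvInnerA re x rest

def se_find_brand_value (any_list : List String) : String :=
  any_list.foldl (fun re x => pvInnerA re x pvBrands) "NAN"

-- ===== PORT B =====
-- reverse scan, return first member of brand
def pvRevGo (xs : List String) : String :=
  match xs with
  | [] => "NAN"
  | x :: rest => if x ∈ pvBrands then x else pvRevGo rest

def se_find_brand_value_alt (any_list : List String) : String :=
  pvRevGo any_list.reverse

-- ===== PRECONDITION & SPEC =====
def Spec_se_find_brand_value (any_list : List String) (out : String) : Prop := out = se_find_brand_value_alt any_list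
instance (any_list : List String) (out : String) : Decidable (Spec_se_find_brand_value any_list out) := by unfold Spec_se_find_brand_value; infer_instance

-- ===== CLAIM (what is proved, stated in full; the proofs are below) =====
def Claim_equal_se_find_brand_value : Prop := ∀ (any_list : List String), Dom_se_find_brand_value any_list → Spec_se_find_brand_value any_list (se_find_brand_value any_list)

-- ===== LEMMAS AND PROOFS =====

-- A's inner loop: if x is a brand it returns x (the matching brand element equals x), else re
theorem pvInnerA_eq (re x : String) (bs : List String) :
    pvInnerA re x bs = if x ∈ bs then x else re := by
  induction bs with
  | nil => simp [pvInnerA]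
  | cons b rest ih =>
    simp only [pvInnerA, List.mem_cons, ih]
    by_cases h : x = b
    · simp [h]
    · simp [h]

theorem foldl_eq_revGo (l : List String) :
    l.foldl (fun re x => pvInnerA re x pvBrands) "NAN" = pvRevGo l.reverse := by
  induction l using List.reverseRecOn with
  | nil => rfl
  | append_singleton l x ih =>
    rw [List.foldl_append, List.foldl_cons, List.foldl_nil, pvInnerA_eq, ih,
      List.reverse_append]
    simp [pvRevGo]

-- ===== VERDICT (by name: the statement is the Claim_ definition above) =====
theorem se_find_brand_value_spec : Claim_equal_se_find_brand_value := by
  intro l _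
  unfold Spec_se_find_brand_value se_find_brand_value se_find_brand_value_alt
  exact foldl_eq_revGo l
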